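-- pv_equiv track=rewrite | github.com/olga-manelyk/learning-python | from_illia/min_number_of_changes.py | find_minimal_amount_of_substution
-- ===== SOURCE A (Python) =====
-- def find_minimal_amount_of_substution(arrows):
--     result = {}
--     for arrow in arrows:
--         if arrow in result:
--             result[arrow] = result[arrow] + 1
--         else:
--             result[arrow] = 1
--     return len(arrows) - max(result.values())
-- ===== SOURCE B (Python) =====
-- def find_minimal_amount_of_substution(arrows):
--     best = 0
--     run = 0
--     prev = None
--     for x in sorted(arrows):
--         run = run + 1 if x == prev else 1
--         if run > best:
--             best = run
--         prev = x
--     return len(arrows) - best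
-- ===== Notes on version B (the rewrite author's own statement) =====
-- stated objective: alternative
-- what changed: Replaces the hash-map frequency count (dict build + max over values) by a sort-then-scan that tracks the longest run of equal consecutive elements in sorted(arrows), keeping only a best/run/prev triple instead of a dict.
import Mathlib
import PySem

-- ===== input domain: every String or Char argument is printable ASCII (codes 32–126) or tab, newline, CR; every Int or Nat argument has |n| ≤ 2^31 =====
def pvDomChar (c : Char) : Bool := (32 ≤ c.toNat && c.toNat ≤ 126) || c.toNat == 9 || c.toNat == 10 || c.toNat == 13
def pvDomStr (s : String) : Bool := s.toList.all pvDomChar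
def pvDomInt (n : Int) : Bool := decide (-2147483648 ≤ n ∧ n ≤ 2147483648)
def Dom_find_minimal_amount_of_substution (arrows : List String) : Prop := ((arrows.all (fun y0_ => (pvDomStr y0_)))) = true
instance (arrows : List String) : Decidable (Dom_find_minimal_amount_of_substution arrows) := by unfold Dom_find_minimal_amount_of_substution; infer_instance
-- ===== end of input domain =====

-- B replaces A's dict frequency count by a sort-then-run-length scan (no dict); same result on
-- every non-empty list (Pre_ excludes [], where A's max() raises ValueError).


-- ===== PORT A =====
def find_minimal_amount_of_substution (arrows : List String) : Int :=
  let result := arrows.foldl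
    (fun (d : PySem.Dict String Int) arrow =>
      if d.contains arrow then d.insert arrow (d.getD arrow 0 + 1)
      else d.insert arrow 1)
    PySem.Dict.empty
  match PySem.List.max? result.values (fun v => v) with
  | some m => (arrows.length : Int) - m
  | none => 0   -- Python raises ValueError here (max of empty); excluded by Pre_

-- ===== PORT B =====
-- one loop step of Source B: state = (best, run, prev)
def pvStepB (st : Int × Int × Option String) (x : String) : Int × Int × Option String :=
  let run := if some x == st.2.2 then st.2.1 + 1 else 1
  let best := if run > st.1 then run else st.1
  (best, run, some x)

def find_minimal_amount_of_substution_alt (arrows : List String) : Int :=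
  let st := (PySem.List.sorted arrows (fun x => x)).foldl pvStepB (0, 0, none)
  (arrows.length : Int) - st.1

-- ===== PRECONDITION & SPEC =====
-- Pre_ excludes only the empty list, on which A's max(result.values()) raises ValueError.
def Pre_find_minimal_amount_of_substution (arrows : List String) : Prop := arrows ≠ []
instance (arrows : List String) : Decidable (Pre_find_minimal_amount_of_substution arrows) := by unfold Pre_find_minimal_amount_of_substution; infer_instance
def pvWitness_find_minimal_amount_of_substution : List String := (["a", "b", "a"])

def Spec_find_minimal_amount_of_substution (arrows : List String) (out : Int) : Prop := out = find_minimal_amount_of_substution_alt arrows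
instance (arrows : List String) (out : Int) : Decidable (Spec_find_minimal_amount_of_substution arrows out) := by unfold Spec_find_minimal_amount_of_substution; infer_instance

-- ===== CLAIM (what is proved, stated in full; the proofs are below) =====
def Claim_equal_find_minimal_amount_of_substution : Prop := ∀ (arrows : List String), Dom_find_minimal_amount_of_substution arrows → Pre_find_minimal_amount_of_substution arrows → Spec_find_minimal_amount_of_substution arrows (find_minimal_amount_of_substution arrows)
-- ===== LEMMAS AND PROOFS =====

-- A's dict-building loop is exactly Counter(arrows)
lemma pvA_dict_eq_counter (arrows : List String) :
    arrows.foldl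
      (fun (d : PySem.Dict String Int) arrow =>
        if d.contains arrow then d.insert arrow (d.getD arrow 0 + 1)
        else d.insert arrow 1)
      PySem.Dict.empty = PySem.Dict.counter arrows := by
  rw [PySem.List.foldl_congr_mem _ _ (fun d x => d.insert x (d.getD x 0 + 1)) _ ?_]
  · exact PySem.Dict.foldl_insert_getD_add_one_eq_counter arrows
  · intro d x _
    by_cases h : d.contains x = true
    · simp [h]
    · simp only [Bool.not_eq_true] at h
      simp [h, PySem.Dict.getD_of_not_contains d 0 h]

-- invariant of B's fold over a sorted list: best is the max multiplicity, run the trailing one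
lemma pvB_inv (s : List String) (h : s.Pairwise (· ≤ ·)) :
    ((s.foldl pvStepB (0, 0, none)).2.2 = s.getLast?) ∧
    (∀ l, s.getLast? = some l →
      ((s.foldl pvStepB (0, 0, none)).2.1 = (s.count l : Int) ∧ ∀ y ∈ s, y ≤ l)) ∧
    (∀ y ∈ s, (s.count y : Int) ≤ (s.foldl pvStepB (0, 0, none)).1) ∧
    (s = [] → (s.foldl pvStepB (0, 0, none)).1 = 0) ∧
    (s ≠ [] → ∃ y ∈ s, (s.foldl pvStepB (0, 0, none)).1 = (s.count y : Int)) := by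
  induction s using List.reverseRecOn with
  | nil => simp
  | append_singleton t x ih =>
    rw [List.pairwise_append] at h
    obtain ⟨ht, -, hle⟩ := h
    simp only [List.mem_singleton, forall_eq] at hle
    obtain ⟨ih1, ih2, ih3, ih4, ih5⟩ := ih ht
    rw [List.foldl_append]
    simp only [List.foldl_cons, List.foldl_nil]
    rcases eq_or_ne t [] with rfl | hne
    · have hb : pvStepB (0, 0, none) x = (1, 1, some x) := by simp [pvStepB]
      simp only [List.foldl_nil, hb, List.nil_append]
      refine ⟨by simp, ?_, ?_, by simp, ?_⟩
      · intro l' hl'; simp at hl'; subst hl'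
        exact ⟨by simp, by intro y hy; simp at hy; exact le_of_eq hy⟩
      · intro y hy; simp at hy; subst hy; simp
      · intro _; exact ⟨x, by simp, by simp⟩
    · obtain ⟨l, hl⟩ := List.getLast?_isSome.mpr hne |> Option.isSome_iff_exists.mp
      obtain ⟨hrun, hmax⟩ := ih2 l hl
      have hlmem : l ∈ t := List.mem_of_getLast? hl
      set st := t.foldl pvStepB (0, 0, (none : Option String)) with hst
      have hprev : st.2.2 = some l := ih1.trans hl
      by_cases hxl : x = l
      · -- x equals the last element: run increments
        subst hxl
        have hstep : pvStepB st x = (if st.2.1 + 1 > st.1 then st.2.1 + 1 else st.1, st.2.1 + 1, some x) := by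
          simp [pvStepB, hprev]
        rw [hstep]
        have hlast : (t ++ [x]).getLast? = some x := by simp
        have hcx : ((t ++ [x]).count x : Int) = (t.count x : Int) + 1 := by
          simp [List.count_append]
        have hcy : ∀ y, y ≠ x → (t ++ [x]).count y = t.count y := by
          intro y hy
          simp [List.count_append, List.count_singleton]
          exact fun h => hy h.symm
        refine ⟨by simp [hlast], ?_, ?_, by simp, ?_⟩
        · intro l' hl'
          rw [hlast] at hl'; injection hl' with hl'e; subst hl'e
          refine ⟨by rw [hrun] at *; simp, ?_⟩
          intro y hy
          rcases List.mem_append.mp hy with hy | hy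
          · exact hle y hy
          · simp at hy; exact le_of_eq hy
        · intro y hy
          by_cases hyx : y = x
          · subst hyx
            rw [hcx, hrun]
            split <;> omega
          · rw [hcy y hyx]
            have := ih3 y (by rcases List.mem_append.mp hy with h' | h'; exact h'; simp at h'; exact absurd h' hyx)
            split <;> omega
        · intro _
          by_cases hgt : st.2.1 + 1 > st.1
          · refine ⟨x, by simp, ?_⟩
            split <;> omega
          · obtain ⟨y0, hy0, hb⟩ := ih5 hne
            have hy0x : y0 ≠ x := by
              intro hyx; subst hyx
              rw [hrun] at hgt; omega
            refine ⟨y0, List.mem_append.mpr (Or.inl hy0), ?_⟩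
            have h2 : List.count y0 (t ++ [x]) = List.count y0 t := hcy y0 hy0x
            split <;> omega
      · -- x is a new (strictly larger) element: run resets to 1
        have hxnot : x ∉ t := by
          intro hx
          exact hxl (le_antisymm (hmax x hx) (hle l hlmem))
        have hstep : pvStepB st x = (if 1 > st.1 then 1 else st.1, 1, some x) := by
          have : (some x == st.2.2) = false := by
            rw [hprev]; simp [Ne.symm, hxl]
          simp [pvStepB, this]
        rw [hstep]
        have hcx : (t ++ [x]).count x = 1 := by
          simp [List.count_append, List.count_eq_zero.mpr hxnot]
        have hcy : ∀ y, y ≠ x → (t ++ [x]).count y = t.count y := by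
          intro y hy
          simp [List.count_append, List.count_singleton]
          exact fun h => hy h.symm
        refine ⟨by simp, ?_, ?_, by simp, ?_⟩
        · intro l' hl'
          simp at hl'; subst hl'
          refine ⟨by simp [hcx], ?_⟩
          intro y hy
          rcases List.mem_append.mp hy with hy | hy
          · exact hle y hy
          · simp at hy; exact le_of_eq hy
        · intro y hy
          by_cases hyx : y = x
          · subst hyx; rw [hcx]; split <;> omega
          · rw [hcy y hyx]
            have := ih3 y (by rcases List.mem_append.mp hy with h' | h'; exact h'; simp at h'; exact absurd h' hyx)
            split <;> omega
        · intro _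
          by_cases hgt : (1 : Int) > st.1
          · refine ⟨x, by simp, ?_⟩
            split <;> omega
          · obtain ⟨y0, hy0, hb⟩ := ih5 hne
            have hy0x : y0 ≠ x := fun hyx => hxnot (hyx ▸ hy0)
            refine ⟨y0, List.mem_append.mpr (Or.inl hy0), ?_⟩
            have h2 : List.count y0 (t ++ [x]) = List.count y0 t := hcy y0 hy0x
            split <;> omega

-- ===== VERDICT (by name: the statement is the Claim_ definition above) =====
theorem find_minimal_amount_of_substution_spec : Claim_equal_find_minimal_amount_of_substution := by
  intro arrows _ hne
  unfold Spec_find_minimal_amount_of_substution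
  have hA : find_minimal_amount_of_substution arrows
      = match PySem.List.max? (PySem.Dict.counter arrows).values (fun v => v) with
        | some m => (arrows.length : Int) - m
        | none => 0 := by
    unfold find_minimal_amount_of_substution
    rw [pvA_dict_eq_counter]
  rw [hA]
  show _ = (arrows.length : Int) - ((PySem.List.sorted arrows (fun x => x)).foldl pvStepB (0, 0, none)).1
  -- values of the counter
  have hvals : (PySem.Dict.counter arrows).values
      = (PySem.Set.ofList arrows).map (fun k => (arrows.count k : Int)) := by
    show ((PySem.Dict.counter arrows).items.map (·.2))
        = (PySem.Set.ofList arrows).map (fun k => (arrows.count k : Int))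
    rw [PySem.Dict.items_counter]
    simp [List.map_map, Function.comp]
  set s := PySem.List.sorted arrows (fun x => x) with hs
  have hperm : s.Perm arrows := PySem.List.sorted_perm arrows (fun x => x) false
  have hsne : s ≠ [] := by
    intro h0
    exact hne (List.perm_nil.mp ((h0 ▸ hperm).symm))
  have hpw : s.Pairwise (· ≤ ·) := PySem.List.sorted_pairwise arrows (fun x => x)
  obtain ⟨-, -, hub, -, hex⟩ := pvB_inv s hpw
  obtain ⟨y0, hy0, hbest⟩ := hex hsne
  -- counts agree between s and arrows
  have hcnt : ∀ y, s.count y = arrows.count y := fun y => hperm.count_eq y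
  have hvne : (PySem.Dict.counter arrows).values ≠ [] := by
    rw [hvals]
    intro h0
    obtain ⟨a, ha⟩ := List.exists_mem_of_ne_nil arrows hne
    have hmem : a ∈ PySem.Set.ofList arrows := (PySem.Set.mem_ofList arrows a).mpr ha
    rw [List.map_eq_nil_iff.mp h0] at hmem
    exact absurd hmem (List.not_mem_nil)
  obtain ⟨m, hm⟩ : ∃ m, PySem.List.max? (PySem.Dict.counter arrows).values (fun v => v) = some m := by
    rcases h : PySem.List.max? (PySem.Dict.counter arrows).values (fun v => v) with _ | m
    · exact absurd ((PySem.List.max?_eq_none_iff _ _).mp h) hvne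
    · exact ⟨m, rfl⟩
  rw [hm]
  show (arrows.length : Int) - m = (arrows.length : Int) - (s.foldl pvStepB (0, 0, none)).1
  -- m is a count of some k0 ∈ arrows, and an upper bound on all counts
  have hmmem := PySem.List.max?_mem hm
  rw [hvals] at hmmem
  obtain ⟨k0, hk0set, hk0⟩ := List.mem_map.mp hmmem
  have hk0mem : k0 ∈ arrows := (PySem.Set.mem_ofList arrows k0).mp hk0set
  have hmub : ∀ y ∈ arrows, (arrows.count y : Int) ≤ m := by
    intro y hy
    have hyv : (arrows.count y : Int) ∈ (PySem.Dict.counter arrows).values := by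
      rw [hvals]
      exact List.mem_map.mpr ⟨y, (PySem.Set.mem_ofList arrows y).mpr hy, rfl⟩
    exact PySem.List.max?_isMax hm _ hyv
  -- best = m
  have h1 : (s.foldl pvStepB (0, 0, none)).1 ≤ m := by
    rw [hbest, hcnt y0]
    exact hmub y0 (hperm.mem_iff.mp hy0)
  have h2 : m ≤ (s.foldl pvStepB (0, 0, none)).1 := by
    rw [← hk0]
    have := hub k0 (hperm.mem_iff.mpr hk0mem)
    rwa [hcnt k0] at this
  omega
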